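-- pv_equiv track=rewrite | github.com/nyucel/blm2010 | final/180401030.py | toplam_xiyi
-- ===== SOURCE A (Python) =====
-- def toplam_xiyi(list, n):
--     toplam_xiyi = []
--     for i in range(7):
--         xiyi = 0
--         for j in range(n):
--             xiyi += ((j+1) ** i) * (list[j])
--         toplam_xiyi.append(xiyi)
--     return toplam_xiyi
-- ===== SOURCE B (Python) =====
-- def toplam_xiyi(list, n):
--     result = [0] * 7
--     for j in range(n):
--         x = list[j]
--         base = j + 1
--         p = 1
--         for i in range(7):
--             result[i] += p * x
--             p *= base
--     return result
-- ===== Notes on version B (the rewrite author's own statement) =====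
-- stated objective: alternative
-- what changed: One pass over the data maintaining seven running sums with incrementally accumulated powers, instead of seven independent scans each recomputing (j+1)**i; same asymptotic cost.
import Mathlib
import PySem

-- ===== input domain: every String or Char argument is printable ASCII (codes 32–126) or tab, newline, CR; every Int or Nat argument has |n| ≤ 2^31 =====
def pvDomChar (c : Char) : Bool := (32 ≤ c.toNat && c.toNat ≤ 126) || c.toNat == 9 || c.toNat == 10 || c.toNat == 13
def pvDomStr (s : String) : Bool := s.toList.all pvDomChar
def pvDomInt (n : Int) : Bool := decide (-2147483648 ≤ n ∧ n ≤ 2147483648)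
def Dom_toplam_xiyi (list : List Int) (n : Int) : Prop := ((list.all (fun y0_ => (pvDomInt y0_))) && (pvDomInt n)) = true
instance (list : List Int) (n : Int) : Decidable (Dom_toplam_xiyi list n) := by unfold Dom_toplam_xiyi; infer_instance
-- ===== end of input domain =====

-- B replaces A's seven independent scans by a single pass over the data that
-- maintains seven running sums with incrementally accumulated powers (objective: alternative decomposition).


-- ===== PORT A =====
-- Python's (j+1) ** i with i drawn from range(7) (so i ≥ 0): ported as ^ i.toNat, exact here.
def toplam_xiyi (list : List Int) (n : Int) : List Int :=
  (PySem.List.pyRange 0 7 1).foldl (fun acc i =>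
    acc ++ [(PySem.List.pyRange 0 n 1).foldl
      (fun xiyi j => xiyi + ((j + 1) ^ i.toNat) * PySem.List.pyGetD list j 0) 0]) []

-- ===== PORT B =====
-- inner i-loop of Source B: result[i] += p * x; p *= base, over the 7 accumulators
def pvAddPow (x p base : Int) : List Int → List Int
  | [] => []
  | r :: rs => (r + p * x) :: pvAddPow x (p * base) base rs

def toplam_xiyi_alt (list : List Int) (n : Int) : List Int :=
  (PySem.List.pyRange 0 n 1).foldl
    (fun result j => pvAddPow (PySem.List.pyGetD list j 0) 1 (j + 1) result)
    (List.replicate 7 0)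

-- ===== PRECONDITION & SPEC =====
-- A (and B alike) raise IndexError on list[j] exactly when n exceeds the list length.
def Pre_toplam_xiyi (list : List Int) (n : Int) : Prop := n ≤ list.length
instance (list : List Int) (n : Int) : Decidable (Pre_toplam_xiyi list n) := by unfold Pre_toplam_xiyi; infer_instance
def pvWitness_toplam_xiyi : List Int × Int := ([3, -1, 4], 3)
def Spec_toplam_xiyi (list : List Int) (n : Int) (out : List Int) : Prop := out = toplam_xiyi_alt list n
instance (list : List Int) (n : Int) (out : List Int) : Decidable (Spec_toplam_xiyi list n out) := by unfold Spec_toplam_xiyi; infer_instance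

-- ===== CLAIM (what is proved, stated in full; the proofs are below) =====
def Claim_equal_toplam_xiyi : Prop := ∀ (list : List Int) (n : Int), Dom_toplam_xiyi list n → Pre_toplam_xiyi list n → Spec_toplam_xiyi list n (toplam_xiyi list n)

-- ===== LEMMAS AND PROOFS =====

-- the inner sum A computes for exponent k over the range 0..m-1
def pvSum (list : List Int) (k : Nat) (m : Nat) : Int :=
  (PySem.List.pyRange 0 (m : Int) 1).foldl
    (fun xiyi j => xiyi + ((j + 1) ^ k) * PySem.List.pyGetD list j 0) 0

lemma pvB_eq (list : List Int) (m : Nat) :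
    (PySem.List.pyRange 0 (m : Int) 1).foldl
      (fun result j => pvAddPow (PySem.List.pyGetD list j 0) 1 (j + 1) result)
      (List.replicate 7 0)
    = [pvSum list 0 m, pvSum list 1 m, pvSum list 2 m, pvSum list 3 m,
       pvSum list 4 m, pvSum list 5 m, pvSum list 6 m] := by
  induction m with
  | zero => simp [pvSum, PySem.List.pyRange_one_eq_nil, List.replicate]
  | succ m ih =>
    have h : PySem.List.pyRange 0 ((m + 1 : Nat) : Int) 1
        = PySem.List.pyRange 0 (m : Int) 1 ++ [(m : Int)] := by
      push_cast
      exact PySem.List.pyRange_one_succ_right (by positivity)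
    have h2 : ∀ k, pvSum list k (m + 1)
        = pvSum list k m + (((m : Int) + 1) ^ k) * PySem.List.pyGetD list (m : Int) 0 := by
      intro k; unfold pvSum; rw [h, List.foldl_append]; simp
    rw [h, List.foldl_append, ih]
    simp only [List.foldl, pvAddPow, h2, List.cons.injEq]
    refine ⟨by ring, by ring, by ring, by ring, by ring, by ring, by ring, trivial⟩

lemma pvRange_toNat (n : Int) :
    PySem.List.pyRange 0 n 1 = PySem.List.pyRange 0 (n.toNat : Int) 1 := by
  rw [PySem.List.pyRange_one, PySem.List.pyRange_one]
  have h : (n - 0).toNat = ((n.toNat : Int) - 0).toNat := by omega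
  rw [h]

-- ===== VERDICT (by name: the statement is the Claim_ definition above) =====
theorem toplam_xiyi_spec : Claim_equal_toplam_xiyi := by
  intro list n _ _
  unfold Spec_toplam_xiyi toplam_xiyi toplam_xiyi_alt
  rw [pvRange_toNat, pvB_eq]
  have h7 : PySem.List.pyRange 0 7 1 = [0, 1, 2, 3, 4, 5, 6] := by decide
  rw [h7]
  simp [List.foldl, pvSum]
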